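-- pv_equiv track=rewrite | github.com/Ten4city/template-agent | src/layout/detect_controls.py | segment_page_into_tables
-- ===== SOURCE A (Python) =====
-- def segment_page_into_tables(h_lines, min_gap=60):
--     """
--     Segment the page into distinct table regions based on Y gaps.
--
--     When horizontal lines have large Y gaps between them, it indicates
--     separate tables or sections on the page.
--
--     Args:
--         h_lines: Horizontal lines sorted by Y position
--         min_gap: Minimum Y gap to consider as table boundary
--
--     Returns:
--         List of (y_start, y_end) tuples for each table region
--     """
--     if not h_lines:
--         return []
--
--     # Sort by Y position
--     sorted_lines = sorted(h_lines, key=lambda l: l['y'])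
--     y_positions = [l['y'] for l in sorted_lines]
--
--     # Find gaps
--     regions = []
--     region_start = y_positions[0]
--
--     for i in range(1, len(y_positions)):
--         gap = y_positions[i] - y_positions[i-1]
--         if gap > min_gap:
--             # End current region, start new one
--             regions.append((region_start, y_positions[i-1]))
--             region_start = y_positions[i]
--
--     # Add final region
--     regions.append((region_start, y_positions[-1]))
--
--     return regions
-- ===== SOURCE B (Python) =====
-- def segment_page_into_tables(h_lines, min_gap=60):
--     """Pair-based variant: boundaries come from adjacent-value pairs of the
--     sorted y list, and the result is two parallel lists (region starts,
--     region ends) zipped together -- no running state, no index arithmetic."""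
--     if not h_lines:
--         return []
--     ys = sorted(l['y'] for l in h_lines)
--     breaks = [(lo, hi) for lo, hi in zip(ys, ys[1:]) if hi - lo > min_gap]
--     starts = [ys[0]] + [hi for _, hi in breaks]
--     ends = [lo for lo, _ in breaks] + [ys[-1]]
--     return list(zip(starts, ends))
-- ===== Notes on version B (the rewrite author's own statement) =====
-- stated objective: alternative
-- what changed: A walks the sorted y list with a running region_start state, appending a region each time a gap exceeds the threshold; B has no running state: it filters the list of adjacent-value pairs to get the break pairs, builds the region-start list and the region-end list separately from them, and zips the two parallel lists into the result.
import Mathlib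
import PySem

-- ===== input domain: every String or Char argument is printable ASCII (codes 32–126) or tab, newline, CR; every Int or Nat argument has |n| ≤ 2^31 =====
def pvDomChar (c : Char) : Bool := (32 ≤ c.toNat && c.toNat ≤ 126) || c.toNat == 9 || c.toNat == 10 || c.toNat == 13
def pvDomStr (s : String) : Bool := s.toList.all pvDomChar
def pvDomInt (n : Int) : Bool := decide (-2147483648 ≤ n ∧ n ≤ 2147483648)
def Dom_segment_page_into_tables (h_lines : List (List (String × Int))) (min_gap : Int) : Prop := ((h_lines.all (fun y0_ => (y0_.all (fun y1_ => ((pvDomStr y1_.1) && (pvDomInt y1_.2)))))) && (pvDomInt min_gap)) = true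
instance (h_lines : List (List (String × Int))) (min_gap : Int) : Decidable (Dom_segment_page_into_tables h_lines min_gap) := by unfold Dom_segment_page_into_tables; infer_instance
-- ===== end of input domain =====

-- B replaces A's stateful scan (running region_start, append on gap) by a pair-based construction: filter the adjacent-value pairs, derive the region-start and region-end lists separately, zip them; alternative decomposition, same cost.

-- ===== PORT A =====
-- l['y'] is first-match association-list lookup (KeyError when absent — excluded by Pre_): find? with an unreachable default 0
def pvGetY (l : List (String × Int)) : Int := ((l.find? (fun p => p.1 == "y")).map (fun p => p.2)).getD 0

def segment_page_into_tables (h_lines : List (List (String × Int))) (min_gap : Int) : List (Int × Int) :=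
  if h_lines = [] then []
  else
    let sorted_lines := PySem.List.sorted h_lines (fun l => pvGetY l) false
    let y_positions := sorted_lines.map (fun l => pvGetY l)
    let res := (PySem.List.pyRange 1 (PySem.List.len y_positions) 1).foldl
      (fun (st : List (Int × Int) × Int) i =>
        let gap := PySem.List.pyGetD y_positions i 0 - PySem.List.pyGetD y_positions (i-1) 0
        if gap > min_gap then
          (st.1 ++ [(st.2, PySem.List.pyGetD y_positions (i-1) 0)], PySem.List.pyGetD y_positions i 0)
        else st)
      (([] : List (Int × Int)), PySem.List.pyGetD y_positions 0 0)
    res.1 ++ [(res.2, PySem.List.pyGetD y_positions (-1) 0)]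

-- ===== PORT B =====
def segment_page_into_tables_alt (h_lines : List (List (String × Int))) (min_gap : Int) : List (Int × Int) :=
  if h_lines = [] then []
  else
    let ys := PySem.List.sorted (h_lines.map (fun l => pvGetY l)) (fun x => x) false
    let breaks := (ys.zip ys.tail).filter (fun p => p.2 - p.1 > min_gap)
    let starts := PySem.List.pyGetD ys 0 0 :: breaks.map (fun p => p.2)
    let ends := breaks.map (fun p => p.1) ++ [PySem.List.pyGetD ys (-1) 0]
    starts.zip ends

-- ===== PRECONDITION & SPEC =====
-- Pre_ excludes exactly the lines without a 'y' key, on which Python A raises KeyError (B raises there too).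
def Pre_segment_page_into_tables (h_lines : List (List (String × Int))) (min_gap : Int) : Prop :=
  ∀ l ∈ h_lines, (l.find? (fun p => p.1 == "y")).isSome = true
instance (h_lines : List (List (String × Int))) (min_gap : Int) : Decidable (Pre_segment_page_into_tables h_lines min_gap) := by unfold Pre_segment_page_into_tables; infer_instance
def pvWitness_segment_page_into_tables : (List (List (String × Int))) × Int := ([[("y", 10)], [("y", 200)]], 60)

def Spec_segment_page_into_tables (h_lines : List (List (String × Int))) (min_gap : Int) (out : List (Int × Int)) : Prop := out = segment_page_into_tables_alt h_lines min_gap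
instance (h_lines : List (List (String × Int))) (min_gap : Int) (out : List (Int × Int)) : Decidable (Spec_segment_page_into_tables h_lines min_gap out) := by unfold Spec_segment_page_into_tables; infer_instance

-- ===== CLAIM (what is proved, stated in full; the proofs are below) =====
def Claim_equal_segment_page_into_tables : Prop := ∀ (h_lines : List (List (String × Int))) (min_gap : Int), Dom_segment_page_into_tables h_lines min_gap → Pre_segment_page_into_tables h_lines min_gap → Spec_segment_page_into_tables h_lines min_gap (segment_page_into_tables h_lines min_gap)

-- ===== LEMMAS AND PROOFS =====

-- mapping the sort key over a key-sorted list = identity-sorting the mapped list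
theorem pv_map_key_sorted {α κ : Type} [LinearOrder κ] (xs : List α) (key : α → κ) :
    PySem.List.sorted (xs.map key) (fun x => x) false = (PySem.List.sorted xs key false).map key := by
  apply PySem.List.sorted_id_eq_of_perm_of_pairwise
  · exact ((PySem.List.sorted_perm xs key false).map key)
  · exact PySem.List.sorted_map_key_pairwise xs key

-- the indices 1..n read through pyGetD at i-1 and i ARE the adjacent-value pairs
theorem pv_index_pairs (ys : List Int) :
    (PySem.List.pyRange 1 (PySem.List.len ys) 1).map
      (fun i => (PySem.List.pyGetD ys (i-1) 0, PySem.List.pyGetD ys i 0))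
    = ys.zip ys.tail := by
  apply List.ext_getElem
  · simp [PySem.List.length_pyRange_one, PySem.List.len_eq]
  · intro k h1 h2
    have hk : k < ys.length - 1 := by
      simpa [PySem.List.length_pyRange_one, PySem.List.len_eq] using h1
    simp only [List.getElem_map, PySem.List.getElem_pyRange_one, List.getElem_zip,
      List.getElem_tail]
    have h1k : (1 : Int) + k - 1 = (k : Int) := by omega
    have h2k : (1 : Int) + k = ((k + 1 : Nat) : Int) := by push_cast; omega
    rw [h1k, h2k, PySem.List.pyGetD_natCast, PySem.List.pyGetD_natCast,
      List.getD_eq_getElem ys 0 (show k < ys.length by omega),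
      List.getD_eq_getElem ys 0 (show k + 1 < ys.length by omega)]

-- the A-loop invariant over adjacent pairs: scan state = zip of starts and ends
theorem pv_inv (mg : Int) (ps : List (Int × Int)) (acc : List (Int × Int)) (start last : Int) :
    (let st := ps.foldl
        (fun (st : List (Int × Int) × Int) p =>
          if p.2 - p.1 > mg then (st.1 ++ [(st.2, p.1)], p.2) else st)
        (acc, start);
      st.1 ++ [(st.2, last)])
    = acc ++ ((start :: (ps.filter (fun p => p.2 - p.1 > mg)).map (fun p => p.2)).zip
               ((ps.filter (fun p => p.2 - p.1 > mg)).map (fun p => p.1) ++ [last])) := by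
  induction ps generalizing acc start with
  | nil => simp
  | cons p t ih =>
    simp only [List.foldl_cons, List.filter_cons]
    by_cases hp : p.2 - p.1 > mg
    · simp only [hp, decide_true, if_true]
      rw [ih]
      simp
    · simp only [hp, decide_false, if_false]
      rw [ih]
      simp

-- ===== VERDICT (by name: the statement is the Claim_ definition above) =====
theorem segment_page_into_tables_spec : Claim_equal_segment_page_into_tables := by
  intro h_lines min_gap _hdom _hpre
  unfold Spec_segment_page_into_tables segment_page_into_tables segment_page_into_tables_alt
  by_cases h : h_lines = []
  · simp [h]
  · simp only [h, if_false]
    rw [pv_map_key_sorted]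
    set ys := (PySem.List.sorted h_lines (fun l => pvGetY l) false).map (fun l => pvGetY l) with hys
    have hfold : (PySem.List.pyRange 1 (PySem.List.len ys) 1).foldl
        (fun (st : List (Int × Int) × Int) i =>
          let gap := PySem.List.pyGetD ys i 0 - PySem.List.pyGetD ys (i-1) 0
          if gap > min_gap then
            (st.1 ++ [(st.2, PySem.List.pyGetD ys (i-1) 0)], PySem.List.pyGetD ys i 0)
          else st)
        (([] : List (Int × Int)), PySem.List.pyGetD ys 0 0)
        = (ys.zip ys.tail).foldl
        (fun (st : List (Int × Int) × Int) p =>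
          if p.2 - p.1 > min_gap then (st.1 ++ [(st.2, p.1)], p.2) else st)
        (([] : List (Int × Int)), PySem.List.pyGetD ys 0 0) := by
      rw [← pv_index_pairs ys, List.foldl_map]
    rw [hfold]
    exact pv_inv min_gap (ys.zip ys.tail) [] (PySem.List.pyGetD ys 0 0) (PySem.List.pyGetD ys (-1) 0)
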